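-- pv_equiv track=rewrite | github.com/ma-shamshiri/Spam-Detector | Spam Detector/spam_detector.py | bagOfWords_genarator
-- ===== SOURCE A (Python) =====
-- def frequency_calculator(words):
--     wf = {}
--     for word in words:
--         if word in wf:
--             wf[word] += 1
--         else:
--             wf[word] = 1
--
--     return wf
--
-- def bagOfWords_genarator(all_uniqueWords, spam_trainWords, ham_trainWords):
--     spam_bagOfWords = frequency_calculator(spam_trainWords)
--     ham_bagOfWords = frequency_calculator(ham_trainWords)
--
--     for word in all_uniqueWords:
--         if word not in spam_bagOfWords.keys():
--             spam_bagOfWords[word] = 0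
--         if word not in ham_bagOfWords.keys():
--             ham_bagOfWords[word] = 0
--
--     spam_bagOfWords = dict(
--         sorted(spam_bagOfWords.items(), key=lambda item: item[0]))
--     ham_bagOfWords = dict(
--         sorted(ham_bagOfWords.items(), key=lambda item: item[0]))
--
--     return spam_bagOfWords, ham_bagOfWords
-- ===== SOURCE B (Python) =====
-- def bagOfWords_genarator(all_uniqueWords, spam_trainWords, ham_trainWords):
--     vocab = sorted(set(all_uniqueWords))
--
--     def bag(train):
--         # sort the training words, run-length encode the sorted list,
--         # then merge the runs with the sorted vocabulary (zeros for vocab-only words)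
--         ts = sorted(train)
--         runs = []
--         i = 0
--         n = len(ts)
--         while i < n:
--             j = i + 1
--             while j < n and ts[j] == ts[i]:
--                 j += 1
--             runs.append((ts[i], j - i))
--             i = j
--         items = []
--         r, v = 0, 0
--         while r < len(runs) and v < len(vocab):
--             w, c = runs[r]
--             u = vocab[v]
--             if w < u:
--                 items.append((w, c)); r += 1
--             elif u < w:
--                 items.append((u, 0)); v += 1
--             else:
--                 items.append((w, c)); r += 1; v += 1
--         while r < len(runs):
--             items.append(runs[r]); r += 1
--         while v < len(vocab):
--             items.append((vocab[v], 0)); v += 1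
--         return dict(items)
--
--     return bag(spam_trainWords), bag(ham_trainWords)
-- ===== Notes on version B (the rewrite author's own statement) =====
-- stated objective: alternative
-- what changed: B replaces A's dict-counting + zero-fill + sort-items pipeline with a dict-free sort-based algorithm: sort the training words, run-length encode the sorted list into (word,count) runs, and two-pointer merge the runs with the sorted distinct vocabulary, emitting zeros for vocabulary-only words.
import Mathlib
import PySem

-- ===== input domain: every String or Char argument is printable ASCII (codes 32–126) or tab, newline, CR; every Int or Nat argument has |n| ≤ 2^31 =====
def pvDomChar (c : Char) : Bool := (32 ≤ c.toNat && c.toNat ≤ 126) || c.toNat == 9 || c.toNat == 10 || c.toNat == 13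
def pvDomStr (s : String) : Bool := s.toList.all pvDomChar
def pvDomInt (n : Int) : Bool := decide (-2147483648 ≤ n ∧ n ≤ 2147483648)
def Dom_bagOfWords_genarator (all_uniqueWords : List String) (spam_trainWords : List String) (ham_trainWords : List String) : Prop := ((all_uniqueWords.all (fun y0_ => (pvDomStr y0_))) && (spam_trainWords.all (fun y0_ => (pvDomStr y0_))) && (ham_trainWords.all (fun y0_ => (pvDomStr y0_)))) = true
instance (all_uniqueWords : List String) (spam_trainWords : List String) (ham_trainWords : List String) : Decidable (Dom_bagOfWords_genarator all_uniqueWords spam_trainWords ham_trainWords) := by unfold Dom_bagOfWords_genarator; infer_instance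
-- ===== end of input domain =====

-- B is a dict-free alternative of the same cost: sort each training list, run-length
-- encode it into (word, count) runs, and two-pointer merge the runs with the sorted
-- distinct vocabulary (zeros for vocabulary-only words); objective: alternative.

-- ===== PORT A =====
-- helper: frequency_calculator
def pvFreq (words : List String) : PySem.Dict String Int :=
  words.foldl
    (fun wf word =>
      if wf.contains word then wf.insert word (wf.getD word 0 + 1)
      else wf.insert word 1)
    PySem.Dict.empty

-- one zero-fill step ('if word not in d.keys(): d[word] = 0')
def pvFill (d : PySem.Dict String Int) (word : String) : PySem.Dict String Int :=
  if d.contains word then d else d.insert word 0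

def bagOfWords_genarator (all_uniqueWords : List String) (spam_trainWords : List String) (ham_trainWords : List String) : (List (String × Int)) × (List (String × Int)) :=
  let spam_bagOfWords := pvFreq spam_trainWords
  let ham_bagOfWords := pvFreq ham_trainWords
  -- 'for word in all_uniqueWords: …' updates both dicts in one loop
  let p := all_uniqueWords.foldl
    (fun (p : PySem.Dict String Int × PySem.Dict String Int) word =>
      (pvFill p.1 word, pvFill p.2 word))
    (spam_bagOfWords, ham_bagOfWords)
  ((PySem.Dict.ofList (PySem.List.sorted p.1.items (fun it => it.1))).items,
   (PySem.Dict.ofList (PySem.List.sorted p.2.items (fun it => it.1))).items)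

-- ===== PORT B =====
-- the inner while loop pair: run-length encode a (sorted) list; each step emits the
-- current word with count j - i = 1 + (number of equal following words)
def pvRuns : List String → List (String × Int)
  | [] => []
  | x :: xs =>
    (x, (1 : Int) + (xs.takeWhile (fun y => y == x)).length)
      :: pvRuns (xs.dropWhile (fun y => y == x))
termination_by l => l.length
decreasing_by
  simpa using Nat.lt_succ_of_le (List.length_dropWhile_le (fun y => y == x) xs)

-- the three merge while loops: two-pointer merge of runs with the sorted vocabulary
def pvMerge : List (String × Int) → List String → List (String × Int)
  | [], vs => vs.map (fun u => (u, (0 : Int)))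
  | rs, [] => rs
  | (w, c) :: rs, u :: vs =>
    if w < u then (w, c) :: pvMerge rs (u :: vs)
    else if u < w then (u, 0) :: pvMerge ((w, c) :: rs) vs
    else (w, c) :: pvMerge rs vs
termination_by rs vs => rs.length + vs.length

-- helper: 'bag(train)' from Source B
def pvBagB (vocab : List String) (train : List String) : List (String × Int) :=
  (PySem.Dict.ofList
    (pvMerge (pvRuns (PySem.List.sorted train (fun w => w))) vocab)).items

def bagOfWords_genarator_alt (all_uniqueWords : List String) (spam_trainWords : List String) (ham_trainWords : List String) : (List (String × Int)) × (List (String × Int)) :=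
  let vocab := PySem.List.sorted (PySem.Set.ofList all_uniqueWords) (fun w => w)
  (pvBagB vocab spam_trainWords, pvBagB vocab ham_trainWords)

-- ===== PRECONDITION & SPEC =====
def Spec_bagOfWords_genarator (all_uniqueWords : List String) (spam_trainWords : List String) (ham_trainWords : List String) (out : (List (String × Int)) × (List (String × Int))) : Prop := out = bagOfWords_genarator_alt all_uniqueWords spam_trainWords ham_trainWords
instance (all_uniqueWords : List String) (spam_trainWords : List String) (ham_trainWords : List String) (out : (List (String × Int)) × (List (String × Int))) : Decidable (Spec_bagOfWords_genarator all_uniqueWords spam_trainWords ham_trainWords out) := by unfold Spec_bagOfWords_genarator; infer_instance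

-- ===== CLAIM (what is proved, stated in full; the proofs are below) =====
def Claim_equal_bagOfWords_genarator : Prop := ∀ (all_uniqueWords : List String) (spam_trainWords : List String) (ham_trainWords : List String), Dom_bagOfWords_genarator all_uniqueWords spam_trainWords ham_trainWords → Spec_bagOfWords_genarator all_uniqueWords spam_trainWords ham_trainWords (bagOfWords_genarator all_uniqueWords spam_trainWords ham_trainWords)

-- ===== LEMMAS AND PROOFS =====

-- proof-side pure key merge underlying pvMerge
def pvMK : List String → List String → List String
  | [], vs => vs
  | ks, [] => ks
  | k :: ks, v :: vs =>
    if k < v then k :: pvMK ks (v :: vs)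
    else if v < k then v :: pvMK (k :: ks) vs
    else k :: pvMK ks vs
termination_by ks vs => ks.length + vs.length

theorem mem_pvMK (a b : List String) (x : String) :
    x ∈ pvMK a b ↔ x ∈ a ∨ x ∈ b := by
  induction a, b using pvMK.induct with
  | case1 vs => simp [pvMK]
  | case2 ks h => cases ks with
    | nil => simp [pvMK]
    | cons k ks => simp [pvMK]
  | case3 k ks v vs h ih => simp [pvMK, h, ih]; tauto
  | case4 k ks v vs h1 h2 ih => simp [pvMK, h1, h2, ih]; tauto
  | case5 k ks v vs h1 h2 ih =>
    have : k = v := le_antisymm (not_lt.mp h2) (not_lt.mp h1)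
    simp [pvMK, ih, this]; tauto

theorem pairwise_pvMK (a b : List String) (ha : a.Pairwise (· < ·))
    (hb : b.Pairwise (· < ·)) : (pvMK a b).Pairwise (· < ·) := by
  induction a, b using pvMK.induct with
  | case1 vs => simpa [pvMK] using hb
  | case2 ks h => cases ks with
    | nil => simp [pvMK]
    | cons k ks => simpa [pvMK] using ha
  | case3 k ks v vs h ih =>
    rw [List.pairwise_cons] at ha
    rw [List.pairwise_cons] at hb
    simp only [pvMK, if_pos h]
    refine List.Pairwise.cons ?_ (ih ha.2 (List.pairwise_cons.mpr hb))
    intro y hy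
    rcases (mem_pvMK ks (v :: vs) y).mp hy with hk | hv
    · exact ha.1 y hk
    · rcases List.mem_cons.mp hv with rfl | hv
      · exact h
      · exact lt_trans h (hb.1 y hv)
  | case4 k ks v vs h1 h2 ih =>
    rw [List.pairwise_cons] at hb
    simp only [pvMK, if_neg h1, if_pos h2]
    refine List.Pairwise.cons ?_ (ih ha hb.2)
    intro y hy
    rcases (mem_pvMK (k :: ks) vs y).mp hy with hk | hv
    · rcases List.mem_cons.mp hk with rfl | hk
      · exact h2
      · exact lt_trans h2 ((List.pairwise_cons.mp ha).1 y hk)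
    · exact hb.1 y hv
  | case5 k ks v vs h1 h2 ih =>
    have hkv : k = v := le_antisymm (not_lt.mp h2) (not_lt.mp h1)
    rw [List.pairwise_cons] at ha
    rw [List.pairwise_cons] at hb
    simp only [pvMK, if_neg h1, if_neg h2]
    refine List.Pairwise.cons ?_ (ih ha.2 hb.2)
    intro y hy
    rcases (mem_pvMK ks vs y).mp hy with hk | hv
    · exact ha.1 y hk
    · exact hkv ▸ hb.1 y hv

theorem pvMerge_map (g : String → Int) (a b : List String)
    (ha : a.Pairwise (· < ·)) (hb : b.Pairwise (· < ·))
    (h0 : ∀ u ∈ b, u ∉ a → g u = 0) :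
    pvMerge (a.map (fun w => (w, g w))) b = (pvMK a b).map (fun w => (w, g w)) := by
  induction a, b using pvMK.induct with
  | case1 vs =>
    simp only [List.map_nil, pvMerge, pvMK]
    exact List.map_congr_left (fun u hu => by rw [h0 u hu (by simp)])
  | case2 ks h =>
    cases ks with
    | nil => simp [pvMerge, pvMK]
    | cons k ks => simp [pvMerge, pvMK]
  | case3 k ks v vs h ih =>
    rw [List.pairwise_cons] at ha
    simp only [List.map_cons, pvMerge, if_pos h, pvMK]
    rw [ih ha.2 hb ?_]
    intro u hu hks
    refine h0 u hu ?_
    intro hmem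
    rcases List.mem_cons.mp hmem with rfl | hmem
    · rcases List.mem_cons.mp hu with rfl | hu
      · exact absurd h (lt_irrefl _)
      · exact absurd (lt_trans h ((List.pairwise_cons.mp hb).1 u hu)) (lt_irrefl _)
    · exact hks hmem
  | case4 k ks v vs h1 h2 ih =>
    rw [List.pairwise_cons] at hb
    simp only [List.map_cons, pvMerge, if_neg h1, if_pos h2, pvMK]
    have hv0 : g v = 0 := by
      refine h0 v (by simp) ?_
      intro hmem
      rcases List.mem_cons.mp hmem with rfl | hmem
      · exact absurd h2 (lt_irrefl _)
      · exact absurd (lt_trans h2 ((List.pairwise_cons.mp ha).1 v hmem)) (lt_irrefl _)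
    rw [hv0]
    have h0' : ∀ u ∈ vs, u ∉ k :: ks → g u = 0 :=
      fun u hu hks => h0 u (by simp [hu]) hks
    exact congrArg (List.cons (v, 0)) (ih ha hb.2 h0')
  | case5 k ks v vs h1 h2 ih =>
    have hkv : k = v := le_antisymm (not_lt.mp h2) (not_lt.mp h1)
    rw [List.pairwise_cons] at ha
    rw [List.pairwise_cons] at hb
    simp only [List.map_cons, pvMerge, if_neg h1, if_neg h2, pvMK]
    rw [ih ha.2 hb.2 ?_]
    intro u hu hks
    refine h0 u (by simp [hu]) ?_
    intro hmem
    rcases List.mem_cons.mp hmem with rfl | hmem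
    · exact absurd (hkv ▸ hb.1 u hu) (lt_irrefl _)
    · exact hks hmem

theorem ofList_sublist (xs : List String) : (PySem.Set.ofList xs).Sublist xs := by
  induction xs using List.reverseRecOn with
  | nil => simp [PySem.Set.ofList]
  | append_singleton xs x ih =>
    rw [PySem.Set.ofList_append_singleton]
    show (PySem.Set.add (PySem.Set.ofList xs) x).Sublist (xs ++ [x])
    by_cases h : PySem.Set.contains (PySem.Set.ofList xs) x = true
    · simp only [PySem.Set.add, h, if_pos]
      exact ih.trans (List.sublist_append_left xs [x])
    · simp only [PySem.Set.add, h, if_neg, Bool.false_eq_true, not_false_iff]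
      exact ih.append (List.Sublist.refl [x])

theorem foldl_add_const (x : String) (t : List String) (hx : ∀ y ∈ t, y = x) :
    t.foldl PySem.Set.add [x] = [x] := by
  induction t with
  | nil => rfl
  | cons y t ih =>
    have hy : y = x := hx y (by simp)
    subst hy
    rw [List.foldl_cons]
    have : PySem.Set.add [y] y = [y] := by simp [PySem.Set.add, PySem.Set.contains]
    rw [this]
    exact ih (fun z hz => hx z (by simp [hz]))

theorem pvRuns_eq (ts : List String) (h : ts.Pairwise (· ≤ ·)) :
    pvRuns ts = (PySem.Set.ofList ts).map (fun w => (w, (ts.count w : Int))) := by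
  induction ts using pvRuns.induct with
  | case1 => simp [pvRuns]
  | case2 x xs ih =>
    rw [List.pairwise_cons] at h
    set t := xs.takeWhile (fun y => y == x) with ht
    set d := xs.dropWhile (fun y => y == x) with hd
    have hxs : xs = t ++ d := (List.takeWhile_append_dropWhile).symm
    have hxt : ∀ y ∈ t, y = x := by
      intro y hy
      have := List.mem_takeWhile_imp hy
      simpa using this
    have hdsub : d.Sublist xs := hd ▸ List.dropWhile_sublist _
    have hdp : d.Pairwise (· ≤ ·) := h.2.sublist hdsub
    have hxd : ∀ y ∈ d, x < y := by
      cases hde : d with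
      | nil => simp
      | cons d0 d' =>
        have hne : ¬(d0 == x) = true := by
          have := List.head_dropWhile_not (fun y => y == x) (l := xs)
          rw [← hd, hde] at this
          simpa using this (by simp)
        have hd0x : d0 ≠ x := by simpa using hne
        have hlt : x < d0 :=
          lt_of_le_of_ne (h.1 d0 (hdsub.mem (by simp [hde]))) (Ne.symm hd0x)
        intro y hy
        rcases List.mem_cons.mp hy with rfl | hy
        · exact hlt
        · have : d0 ≤ y := by
            rw [hde] at hdp
            exact (List.pairwise_cons.mp hdp).1 y hy
          exact lt_of_lt_of_le hlt this
    have hxnd : x ∉ d := fun hm => absurd (hxd x hm) (lt_irrefl x)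
    -- the distinct elements of ts are x :: (distinct elements of d)
    have hset : PySem.Set.ofList (x :: xs) = x :: PySem.Set.ofList d := by
      show (x :: xs).foldl PySem.Set.add [] = x :: PySem.Set.ofList d
      rw [List.foldl_cons]
      have h1 : PySem.Set.add [] x = [x] := rfl
      rw [h1, hxs, List.foldl_append, foldl_add_const x t hxt]
      show PySem.Set.update [x] d = x :: PySem.Set.ofList d
      rw [PySem.Set.update_eq_append_filter]
      have : ∀ y ∈ PySem.Set.ofList d, (!PySem.Set.contains [x] y) = true := by
        intro y hy
        have hyd : y ∈ d := (PySem.Set.mem_ofList d y).mp hy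
        have : y ≠ x := fun he => hxnd (he ▸ hyd)
        simp [PySem.Set.contains, this]
      rw [List.filter_eq_self.mpr this]
      rfl
    -- counts
    have hcx : (x :: xs).count x = 1 + t.length := by
      rw [hxs, List.count_cons_self, List.count_append]
      have h1 : t.count x = t.length := List.count_eq_length.mpr
        (fun b hb => (hxt b hb).symm)
      have h2 : d.count x = 0 := List.count_eq_zero.mpr hxnd
      omega
    have hcw : ∀ w ∈ PySem.Set.ofList d, (x :: xs).count w = d.count w := by
      intro w hw
      have hwd : w ∈ d := (PySem.Set.mem_ofList d w).mp hw
      have hwx : w ≠ x := fun he => absurd (hxd w hwd) (he ▸ lt_irrefl x)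
      rw [hxs]
      have h1 : t.count w = 0 := List.count_eq_zero.mpr
        (fun hm => hwx (hxt w hm))
      have hxw : ¬ x = w := fun he => hwx he.symm
      simp [List.count_append, hxw, h1]
    rw [pvRuns, hset, List.map_cons]
    congr 1
    · rw [hcx, ← ht]; push_cast; ring_nf
    · rw [ih (h.2.sublist hdsub)]
      exact (List.map_congr_left (fun w hw => by rw [hcw w hw])).symm

theorem pvFreq_eq_counter (ws : List String) : pvFreq ws = PySem.Dict.counter ws := by
  have hstep : (fun (wf : PySem.Dict String Int) word =>
      if wf.contains word then wf.insert word (wf.getD word 0 + 1)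
      else wf.insert word 1)
      = (fun (d : PySem.Dict String Int) x => d.insert x (d.getD x 0 + 1)) := by
    funext wf word
    by_cases h : wf.contains word = true
    · simp [h]
    · have h' : wf.contains word = false := by simpa using h
      simp [h', PySem.Dict.getD_of_not_contains wf 0 h']
  unfold pvFreq
  rw [hstep, PySem.Dict.foldl_insert_getD_add_one_eq_counter]

-- the zero-fill pair loop splits into two independent loops
theorem foldl_pvFill_pair (all : List String) (a b : PySem.Dict String Int) :
    all.foldl (fun (p : PySem.Dict String Int × PySem.Dict String Int) word =>
      (pvFill p.1 word, pvFill p.2 word)) (a, b)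
    = (all.foldl pvFill a, all.foldl pvFill b) := by
  induction all generalizing a b with
  | nil => rfl
  | cons w t ih => simpa [List.foldl] using ih (pvFill a w) (pvFill b w)

theorem pvFill_keys (all : List String) (d : PySem.Dict String Int) :
    (all.foldl pvFill d).keys = PySem.Set.update d.keys all := by
  induction all generalizing d with
  | nil => rfl
  | cons w t ih =>
    have hstep : (pvFill d w).keys = PySem.Set.add d.keys w := by
      unfold pvFill
      by_cases h : d.contains w = true
      · have hm : w ∈ d.keys := by
          have := PySem.Dict.contains_eq_decide_mem_keys d w
          rw [h] at this; exact of_decide_eq_true this.symm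
        rw [if_pos h]
        simp [PySem.Set.add, PySem.Set.contains, hm]
      · have h' : d.contains w = false := by simpa using h
        rw [if_neg (by simp [h'])]
        have hm : w ∉ d.keys := by
          have := PySem.Dict.contains_eq_decide_mem_keys d w
          rw [h'] at this
          exact of_decide_eq_false this.symm
        rw [PySem.Dict.keys_insert_of_not_contains d 0 h']
        simp [PySem.Set.add, PySem.Set.contains, hm]
    rw [List.foldl_cons, ih, hstep]
    rfl

theorem pvFill_getD (all : List String) (d : PySem.Dict String Int) (v : String) :
    (all.foldl pvFill d).getD v 0 = d.getD v 0 := by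
  induction all generalizing d with
  | nil => rfl
  | cons w t ih =>
    rw [List.foldl_cons, ih]
    unfold pvFill
    by_cases h : d.contains w = true
    · simp [h]
    · have h' : d.contains w = false := by simpa using h
      rw [if_neg (by simp [h']), PySem.Dict.getD_insert]
      by_cases hv : v = w
      · subst hv; rw [if_pos rfl, PySem.Dict.getD_of_not_contains d 0 h']
      · rw [if_neg hv]

-- Set.update (Set.ofList a) b = Set.ofList (a ++ b)
theorem set_update_ofList (a b : List String) :
    PySem.Set.update (PySem.Set.ofList a) b = PySem.Set.ofList (a ++ b) := by
  show PySem.Set.update (PySem.Set.ofList a) b = (a ++ b).foldl PySem.Set.add []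
  rw [List.foldl_append]
  rfl

-- one side of A's result equals the canonical sorted-keys map
theorem sideA_eq (all train : List String) :
    (PySem.Dict.ofList (PySem.List.sorted (all.foldl pvFill (pvFreq train)).items (fun it => it.1))).items
    = (PySem.Dict.ofList
        ((PySem.List.sorted (PySem.Set.ofList (train ++ all)) (fun w => w)).map
          (fun w => (w, (train.count w : Int))))).items := by
  rw [pvFreq_eq_counter]
  set D := all.foldl pvFill (PySem.Dict.counter train) with hD
  have hkeys : D.keys = PySem.Set.ofList (train ++ all) := by
    rw [hD, pvFill_keys, PySem.Dict.keys_counter, set_update_ofList]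
  have hnd : D.keys.Nodup := by rw [hkeys]; exact PySem.Set.nodup_ofList _
  have hitems : D.items
      = (PySem.Set.ofList (train ++ all)).map
          (fun k => (k, (train.count k : Int))) := by
    rw [PySem.Dict.items_eq_map_keys D hnd 0, hkeys]
    refine List.map_congr_left (fun k _ => ?_)
    rw [hD, pvFill_getD, PySem.Dict.getD_counter]
  have hsorted : PySem.List.sorted D.items (fun it => it.1)
      = (PySem.List.sorted (PySem.Set.ofList (train ++ all)) (fun w => w)).map
          (fun k => (k, (train.count k : Int))) := by
    apply PySem.List.sorted_eq_of_perm_of_pairwise_lt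
    · rw [hitems]
      exact (PySem.List.sorted_perm _ _ _).map _
    · have hp := PySem.List.sorted_ofList_pairwise_lt (xs := train ++ all)
      exact hp.map _ (fun a b h => h)
  rw [hsorted]

theorem sideB_eq (all train : List String) :
    pvBagB (PySem.List.sorted (PySem.Set.ofList all) (fun w => w)) train
    = (PySem.Dict.ofList
        ((PySem.List.sorted (PySem.Set.ofList (train ++ all)) (fun w => w)).map
          (fun w => (w, (train.count w : Int))))).items := by
  unfold pvBagB
  set ts := PySem.List.sorted train (fun w => w) with hts
  set vocab := PySem.List.sorted (PySem.Set.ofList all) (fun w => w) with hv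
  have htsle : ts.Pairwise (· ≤ ·) := by
    have := PySem.List.sorted_pairwise (xs := train) (key := fun w => w)
    exact this
  have hKAle : (PySem.Set.ofList ts).Pairwise (· ≤ ·) :=
    htsle.sublist (ofList_sublist ts)
  have hKAnd : (PySem.Set.ofList ts).Nodup := PySem.Set.nodup_ofList _
  have hKA : (PySem.Set.ofList ts).Pairwise (· < ·) :=
    (hKAle.and hKAnd).imp (fun h => lt_of_le_of_ne h.1 h.2)
  have hvp : vocab.Pairwise (· < ·) := PySem.List.sorted_ofList_pairwise_lt _
  have h0 : ∀ u ∈ vocab, u ∉ PySem.Set.ofList ts → ((ts.count u : Int)) = 0 := by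
    intro u _ hu
    have : u ∉ ts := fun hm => hu ((PySem.Set.mem_ofList ts u).mpr hm)
    rw [List.count_eq_zero.mpr this]; rfl
  rw [pvRuns_eq ts htsle,
      pvMerge_map (fun w => (ts.count w : Int)) (PySem.Set.ofList ts) vocab hKA hvp h0]
  have hmk : pvMK (PySem.Set.ofList ts) vocab
      = PySem.List.sorted (PySem.Set.ofList (train ++ all)) (fun w => w) := by
    have hp : (pvMK (PySem.Set.ofList ts) vocab).Pairwise (· < ·) :=
      pairwise_pvMK _ _ hKA hvp
    symm
    apply PySem.List.sorted_eq_of_perm_of_pairwise_lt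
    · have hnd : (pvMK (PySem.Set.ofList ts) vocab).Nodup := hp.imp ne_of_lt
      rw [List.perm_ext_iff_of_nodup hnd (PySem.Set.nodup_ofList _)]
      intro x
      rw [mem_pvMK, PySem.Set.mem_ofList, PySem.Set.mem_ofList]
      have h1 : x ∈ ts ↔ x ∈ train := PySem.List.mem_sorted _ _ _ _
      have h2 : x ∈ vocab ↔ x ∈ all := by
        rw [hv, PySem.List.mem_sorted, PySem.Set.mem_ofList]
      rw [h1, h2, List.mem_append]
    · exact hp
  rw [hmk]
  exact congrArg (fun l => (PySem.Dict.ofList l).items)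
    (List.map_congr_left (fun w _ => by
      rw [(PySem.List.sorted_perm train _ _).count_eq w]))

-- ===== VERDICT (by name: the statement is the Claim_ definition above) =====
theorem bagOfWords_genarator_spec : Claim_equal_bagOfWords_genarator := by
  intro all spam ham _
  show bagOfWords_genarator all spam ham = bagOfWords_genarator_alt all spam ham
  simp only [bagOfWords_genarator, bagOfWords_genarator_alt, foldl_pvFill_pair]
  exact Prod.ext ((sideA_eq all spam).trans (sideB_eq all spam).symm)
    ((sideA_eq all ham).trans (sideB_eq all ham).symm)
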